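-- pv_equiv track=rewrite | github.com/tripping-alien/shortlink | mymath.py | _to_bijective_base6_py
-- ===== SOURCE A (Python) =====
-- def _to_bijective_base6_py(n: int) -> str:
--     if n <= 0:
--         raise ValueError("Input must be a positive integer")
--     chars = "123456"
--     result = []
--     while n > 0:
--         n, remainder = divmod(n - 1, 6)
--         result.append(chars[remainder])
--     return "".join(reversed(result))
-- ===== SOURCE B (Python) =====
-- def _to_bijective_base6_py(n: int) -> str:
--     if n <= 0:
--         raise ValueError("Input must be a positive integer")
--     q, r = divmod(n - 1, 6)
--     prefix = _to_bijective_base6_py(q) if q > 0 else ""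
--     return prefix + "123456"[r]
-- ===== Notes on version B (the rewrite author's own statement) =====
-- stated objective: simpler
-- what changed: Recursion on the quotient builds the string most-significant-digit-first, removing the accumulator list and the reversed()/join step.
import Mathlib
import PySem

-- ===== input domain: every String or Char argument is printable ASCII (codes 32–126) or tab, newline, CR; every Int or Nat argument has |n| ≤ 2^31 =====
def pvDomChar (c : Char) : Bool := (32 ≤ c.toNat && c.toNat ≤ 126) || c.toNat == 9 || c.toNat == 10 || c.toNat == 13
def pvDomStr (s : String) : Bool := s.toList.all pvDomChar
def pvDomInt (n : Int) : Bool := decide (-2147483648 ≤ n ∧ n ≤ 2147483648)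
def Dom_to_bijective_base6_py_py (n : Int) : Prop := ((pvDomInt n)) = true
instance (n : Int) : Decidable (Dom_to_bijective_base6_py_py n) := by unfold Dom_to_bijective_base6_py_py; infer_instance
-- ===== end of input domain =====

-- B replaces A's append-then-reverse digit loop by direct recursion on the quotient,
-- building the string most-significant-digit-first (objective: simpler).

-- ===== PORT A =====
-- the while-loop of A: n, remainder = divmod(n-1, 6); result.append(chars[remainder])
-- chars[remainder] is always in range (0 ≤ remainder < 6), so the .getD default is never used
def toBij6Loop (n : Int) (result : List Char) : List Char :=
  if _h : 0 < n then
    let q := PySem.Int.floordiv (n - 1) 6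
    let r := PySem.Int.mod (n - 1) 6
    toBij6Loop q (result ++ [(PySem.Str.pyGet? "123456" r).getD ' '])
  else result
termination_by n.toNat
decreasing_by
  have hq : PySem.Int.floordiv (n - 1) 6 = (n - 1) / 6 :=
    PySem.Int.floordiv_eq_ediv_of_pos (by norm_num)
  have h1 : 0 ≤ (n - 1) / 6 := Int.ediv_nonneg (by omega) (by norm_num)
  have h2 : (n - 1) / 6 ≤ n - 1 := Int.ediv_le_self _ (by omega)
  simp only [hq]; omega

def to_bijective_base6_py_py (n : Int) : String :=
  if n ≤ 0 then ""  -- Python raises ValueError here; excluded by Pre_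
  else String.ofList ((toBij6Loop n []).reverse)

-- ===== PORT B =====
def to_bijective_base6_py_py_alt (n : Int) : String :=
  if _h : n ≤ 0 then ""  -- Python raises ValueError here; excluded by Pre_
  else
    let q := PySem.Int.floordiv (n - 1) 6
    let r := PySem.Int.mod (n - 1) 6
    let pre := if _hq : 0 < q then to_bijective_base6_py_py_alt q else ""
    pre ++ String.singleton ((PySem.Str.pyGet? "123456" r).getD ' ')
termination_by n.toNat
decreasing_by
  have hle : q * 6 ≤ n - 1 := by
    have := (PySem.Int.le_floordiv_iff_mul_le (a := n - 1) (b := 6) (q := q) (by norm_num)).mp le_rfl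
    exact this
  omega

-- ===== PRECONDITION & SPEC =====
-- Pre_ excludes n ≤ 0, on which both Pythons raise ValueError
def Pre_to_bijective_base6_py_py (n : Int) : Prop := 0 < n
instance (n : Int) : Decidable (Pre_to_bijective_base6_py_py n) := by unfold Pre_to_bijective_base6_py_py; infer_instance
def pvWitness_to_bijective_base6_py_py : Int := (7)

def Spec_to_bijective_base6_py_py (n : Int) (out : String) : Prop := out = to_bijective_base6_py_py_alt n
instance (n : Int) (out : String) : Decidable (Spec_to_bijective_base6_py_py n out) := by unfold Spec_to_bijective_base6_py_py; infer_instance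

-- ===== CLAIM (what is proved, stated in full; the proofs are below) =====
def Claim_equal_to_bijective_base6_py_py : Prop := ∀ (n : Int), Dom_to_bijective_base6_py_py n → Pre_to_bijective_base6_py_py n → Spec_to_bijective_base6_py_py n (to_bijective_base6_py_py n)

-- ===== LEMMAS AND PROOFS =====

-- the loop with accumulator acc computes acc ++ (digits of n, least significant first)
theorem loop_eq_alt (m : Nat) : ∀ (n : Int), n.toNat ≤ m → 0 < n → ∀ (acc : List Char),
    toBij6Loop n acc = acc ++ (to_bijective_base6_py_py_alt n).toList.reverse := by
  induction m with
  | zero => intro n hm hn; omega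
  | succ m ih =>
    intro n hm hn acc
    rw [toBij6Loop, to_bijective_base6_py_py_alt]
    simp only [dif_pos hn, dif_neg (by omega : ¬ n ≤ 0)]
    have hq : PySem.Int.floordiv (n - 1) 6 = (n - 1) / 6 :=
      PySem.Int.floordiv_eq_ediv_of_pos (by norm_num)
    have h1 : 0 ≤ (n - 1) / 6 := Int.ediv_nonneg (by omega) (by norm_num)
    have h2 : (n - 1) / 6 ≤ n - 1 := Int.ediv_le_self _ (by omega)
    rw [hq]
    by_cases hpos : 0 < (n - 1) / 6
    · rw [ih _ (by omega) hpos]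
      simp [if_pos hpos]
    · have hz : (n - 1) / 6 = 0 := by omega
      rw [toBij6Loop]
      simp [hz]

theorem to_bijective_base6_py_py_spec' (n : Int) (hn : 0 < n) :
    to_bijective_base6_py_py n = to_bijective_base6_py_py_alt n := by
  rw [to_bijective_base6_py_py, if_neg (by omega : ¬ n ≤ 0),
    loop_eq_alt n.toNat n le_rfl hn []]
  simp only [List.nil_append, List.reverse_reverse]
  exact String.ofList_toList

-- ===== VERDICT (by name: the statement is the Claim_ definition above) =====
theorem to_bijective_base6_py_py_spec : Claim_equal_to_bijective_base6_py_py := by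
  intro n _ hpre
  exact to_bijective_base6_py_py_spec' n hpre
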